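-- pv_equiv track=rewrite | github.com/Pawel-Truszkowski/practice-python-testing | 02/promo.py | is_valid_promo
-- ===== SOURCE A (Python) =====
-- def is_valid_promo(code):
--     if not isinstance(code, str):
--         return False
--     if len(code) < 10 or len(code) > 10:
--         return False
--     if any(char.islower() for char in code):
--         return False
--     if len([char for char in code if char.isdigit()]) < 2:
--         return False
--     if not code.isalnum():
--         return False
--
--     return True
-- ===== SOURCE B (Python) =====
-- ALLOWED = frozenset("ABCDEFGHIJKLMNOPQRSTUVWXYZ0123456789")
-- DIGITS = "0123456789"
--
--
-- def is_valid_promo(code):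
--     if not isinstance(code, str) or len(code) != 10:
--         return False
--     chars = list(code)
--     if not set(chars) <= ALLOWED:
--         return False
--     return sum(chars.count(d) for d in DIGITS) >= 2
-- ===== Notes on version B (the rewrite author's own statement) =====
-- stated objective: alternative
-- what changed: Instead of classifying each character with islower/isdigit/isalnum predicates, B checks set(code) against a literal whitelist alphabet A-Z0-9 (frozenset inclusion) and counts digits by summing the multiplicity of each of the ten digit characters.
import Mathlib
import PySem

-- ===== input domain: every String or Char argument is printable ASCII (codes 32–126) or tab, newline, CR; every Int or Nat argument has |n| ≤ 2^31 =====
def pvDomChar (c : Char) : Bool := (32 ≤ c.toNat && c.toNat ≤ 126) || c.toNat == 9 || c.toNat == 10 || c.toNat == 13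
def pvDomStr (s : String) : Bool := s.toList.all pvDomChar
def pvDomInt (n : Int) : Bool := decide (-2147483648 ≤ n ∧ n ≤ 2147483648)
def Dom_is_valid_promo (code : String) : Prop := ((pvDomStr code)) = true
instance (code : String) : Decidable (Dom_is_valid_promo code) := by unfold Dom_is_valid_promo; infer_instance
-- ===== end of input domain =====

-- B validates against a literal whitelist alphabet (set inclusion) and counts digits by summing per-digit multiplicities, instead of A's per-character predicate passes; objective: alternative.


-- ===== PORT A =====
def is_valid_promo (code : String) : Bool :=
  if PySem.Str.len code < 10 || PySem.Str.len code > 10 then false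
  else if code.toList.any (fun ch => PySem.Chars.islower ch) then false
  else if (code.toList.filter (fun ch => PySem.Chars.isdigit ch)).length < 2 then false
  else if !(PySem.Chars.strIsalnum code.toList) then false
  else true

-- ===== PORT B =====
-- ALLOWED = frozenset("ABCDEFGHIJKLMNOPQRSTUVWXYZ0123456789") (a frozenset of chars → PySem.Set of the distinct chars)
def pvAllowedChars : List Char :=
  ['A','B','C','D','E','F','G','H','I','J','K','L','M','N','O','P','Q','R','S','T','U','V','W','X','Y','Z',
   '0','1','2','3','4','5','6','7','8','9']
def pvAllowed : PySem.Set Char := PySem.Set.ofList pvAllowedChars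
-- DIGITS = "0123456789", iterated as its characters
def pvDigitChars : List Char := ['0','1','2','3','4','5','6','7','8','9']

def is_valid_promo_alt (code : String) : Bool :=
  if PySem.Str.len code ≠ 10 then false
  else
    let chars := code.toList
    if !((PySem.Set.ofList chars).all (fun c => pvAllowed.contains c)) then false
    else decide ((2 : Int) ≤ (pvDigitChars.map (fun d => (PySem.List.count chars d : Int))).sum)

-- ===== PRECONDITION & SPEC =====
def Spec_is_valid_promo (code : String) (out : Bool) : Prop := out = is_valid_promo_alt code
instance (code : String) (out : Bool) : Decidable (Spec_is_valid_promo code out) := by unfold Spec_is_valid_promo; infer_instance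

-- ===== CLAIM (what is proved, stated in full; the proofs are below) =====
def Claim_equal_is_valid_promo : Prop := ∀ (code : String), Dom_is_valid_promo code → Spec_is_valid_promo code (is_valid_promo code)

-- ===== LEMMAS AND PROOFS =====
-- membership in the whitelist is exactly the two ASCII ranges A-Z, 0-9
theorem pvMemAllowed (c : Char) :
    c ∈ pvAllowedChars ↔ ((65 ≤ c.toNat ∧ c.toNat ≤ 90) ∨ (48 ≤ c.toNat ∧ c.toNat ≤ 57)) := by
  constructor
  · intro h; fin_cases h <;> decide
  · intro h
    have hc : Char.ofNat c.toNat = c := Char.ofNat_toNat c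
    rw [← hc]
    set n := c.toNat with hn
    rcases h with ⟨h1, h2⟩ | ⟨h1, h2⟩ <;> interval_cases n <;> decide

-- the whitelist test is A's per-character classification
theorem pvCharOk (c : Char) :
    pvAllowed.contains c = (!PySem.Chars.islower c && PySem.Chars.isalnum c) := by
  rw [Bool.eq_iff_iff]
  have h1 : pvAllowed.contains c = true ↔ c ∈ pvAllowedChars := by
    simp [pvAllowed, PySem.Set.mem_ofList]
  rw [h1, pvMemAllowed]
  simp only [PySem.Chars.islower, PySem.Chars.isalnum, PySem.Chars.isalpha, PySem.Chars.isupper,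
    PySem.Chars.isdigit, Bool.and_eq_true, Bool.not_eq_true', Bool.or_eq_true,
    Bool.and_eq_false_iff, decide_eq_true_eq, decide_eq_false_iff_not, Char.le_def,
    UInt32.le_iff_toNat_le]
  show _ ↔ (¬(97 ≤ c.toNat) ∨ ¬(c.toNat ≤ 122)) ∧
      (((65 ≤ c.toNat ∧ c.toNat ≤ 90) ∨ (97 ≤ c.toNat ∧ c.toNat ≤ 122)) ∨ (48 ≤ c.toNat ∧ c.toNat ≤ 57))
  omega

theorem pvCharDigit (c : Char) :
    PySem.Chars.isdigit c = true ↔ (48 ≤ c.toNat ∧ c.toNat ≤ 57) := by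
  simp only [PySem.Chars.isdigit, Bool.and_eq_true, decide_eq_true_eq, Char.le_def,
    UInt32.le_iff_toNat_le]
  show (48 ≤ c.toNat ∧ c.toNat ≤ 57) ↔ _
  exact Iff.rfl

-- `all` over the dedup (set) equals `all` over the original list
theorem pvAllOfList (cs : List Char) (p : Char → Bool) :
    (PySem.Set.ofList cs).all p = cs.all p := by
  rw [Bool.eq_iff_iff]
  simp only [List.all_eq_true]
  constructor
  · intro h x hx; exact h x ((PySem.Set.mem_ofList cs x).mpr hx)
  · intro h x hx; exact h x ((PySem.Set.mem_ofList cs x).mp hx)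

theorem pvAllCongr (l : List Char) (f g : Char → Bool) (h : ∀ x ∈ l, f x = g x) :
    l.all f = l.all g := by
  induction l with
  | nil => rfl
  | cons a t ih =>
    simp only [List.all_cons, h a (List.mem_cons_self ..),
      ih (fun x hx => h x (List.mem_cons_of_mem a hx))]

-- the 0/1 row of the count matrix for one character
theorem pvDigitSumIte (c : Char) :
    (pvDigitChars.map (fun d => if c == d then (1 : Int) else 0)).sum =
      if PySem.Chars.isdigit c then 1 else 0 := by
  by_cases hd : PySem.Chars.isdigit c = true
  · obtain ⟨h1, h2⟩ := (pvCharDigit c).mp hd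
    have hc : Char.ofNat c.toNat = c := Char.ofNat_toNat c
    rw [hd, ← hc]
    set n := c.toNat with hn
    interval_cases n <;> decide
  · have hz : ∀ d ∈ pvDigitChars, (fun d => if c == d then (1 : Int) else 0) d = (fun _ => (0 : Int)) d := by
      intro d hdm
      have hne : (c == d) = false := by
        rw [beq_eq_false_iff_ne]
        rintro rfl
        exact hd (by fin_cases hdm <;> decide)
      simp [hne]
    rw [List.map_congr_left hz, Bool.not_eq_true] at *
    simp [hd]

-- summed per-digit multiplicities = number of digit characters
theorem pvSumCounts (cs : List Char) :
    (pvDigitChars.map (fun d => (PySem.List.count cs d : Int))).sum =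
      ((cs.countP (fun ch => PySem.Chars.isdigit ch) : Nat) : Int) := by
  induction cs with
  | nil => decide
  | cons c rest ih =>
    have hstep : ∀ d : Char, (PySem.List.count (c :: rest) d : Int) =
        (PySem.List.count rest d : Int) + (if c == d then (1 : Int) else 0) := by
      intro d
      simp only [PySem.List.count_eq, List.count_cons]
      split <;> push_cast <;> ring
    calc (pvDigitChars.map (fun d => (PySem.List.count (c :: rest) d : Int))).sum
        = (pvDigitChars.map (fun d => (PySem.List.count rest d : Int) + (if c == d then (1 : Int) else 0))).sum := by
          rw [List.map_congr_left (fun d _ => hstep d)]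
      _ = (pvDigitChars.map (fun d => (PySem.List.count rest d : Int))).sum +
            (pvDigitChars.map (fun d => if c == d then (1 : Int) else 0)).sum := by
          rw [← List.sum_map_add]
      _ = ((rest.countP (fun ch => PySem.Chars.isdigit ch) : Nat) : Int) +
            (if PySem.Chars.isdigit c then 1 else 0) := by rw [ih, pvDigitSumIte]
      _ = (((c :: rest).countP (fun ch => PySem.Chars.isdigit ch) : Nat) : Int) := by
          rw [List.countP_cons]
          split <;> push_cast <;> ring

-- Bool shapes of the two if-chains
theorem pvIfChainA (b1 : Bool) (p : Prop) [Decidable p] (b3 : Bool) :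
    (if b1 = true then false else if p then false else if (!b3) = true then false else true)
      = (!b1 && (!(decide p) && b3)) := by
  cases b1 <;> by_cases hp : p <;> cases b3 <;> simp [hp]

theorem pvIfChainB (b c : Bool) : (if (!b) = true then false else c) = (b && c) := by
  cases b <;> rfl

theorem pvAllSplit (l : List Char) (p q : Char → Bool) :
    l.all (fun x => !p x && q x) = (!l.any p && l.all q) := by
  induction l with
  | nil => rfl
  | cons a t ih =>
    simp only [List.all_cons, List.any_cons, ih]
    cases p a <;> cases q a <;> simp

theorem is_valid_promo_spec : Claim_equal_is_valid_promo := by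
  intro code _
  show is_valid_promo code = is_valid_promo_alt code
  unfold is_valid_promo is_valid_promo_alt
  have hlen : PySem.Str.len code = (code.toList.length : Int) := by
    simp [PySem.Str.len]
  by_cases h10 : code.toList.length = 10
  · simp only [hlen, h10, Nat.cast_ofNat]
    have g1 : ((decide ((10 : Int) < 10) || decide ((10 : Int) > 10)) : Bool) = false := by decide
    rw [g1]
    simp only [Bool.false_eq_true, if_false]
    rw [if_neg (show ¬ ((10 : Int) ≠ 10) by norm_num)]
    have hne : code.toList.isEmpty = false := by
      rw [List.isEmpty_eq_false_iff]
      intro h; rw [h] at h10; simp at h10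
    have hsal : PySem.Chars.strIsalnum code.toList = code.toList.all PySem.Chars.isalnum := by
      simp [PySem.Chars.strIsalnum, hne]
    have hB1 : ((PySem.Set.ofList code.toList).all (fun c => pvAllowed.contains c))
        = (!code.toList.any (fun ch => PySem.Chars.islower ch) && code.toList.all PySem.Chars.isalnum) := by
      rw [pvAllOfList, pvAllCongr code.toList _ _ (fun c _ => pvCharOk c), pvAllSplit]
    have hB2 : (pvDigitChars.map (fun d => (PySem.List.count code.toList d : Int))).sum
        = ((code.toList.filter (fun ch => PySem.Chars.isdigit ch)).length : Int) := by
      rw [pvSumCounts, List.countP_eq_length_filter]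
    have hB3 : decide ((2 : Int) ≤ ((code.toList.filter (fun ch => PySem.Chars.isdigit ch)).length : Int))
        = !decide ((code.toList.filter (fun ch => PySem.Chars.isdigit ch)).length < 2) := by
      rw [← decide_not]
      apply decide_eq_decide.mpr
      constructor
      · intro h hlt
        have : ((code.toList.filter (fun ch => PySem.Chars.isdigit ch)).length : Int) < 2 := by exact_mod_cast hlt
        omega
      · intro h
        have : ¬ ((code.toList.filter (fun ch => PySem.Chars.isdigit ch)).length : Int) < 2 := by
          intro hlt
          exact h (by exact_mod_cast hlt)
        omega
    rw [pvIfChainA, pvIfChainB, hB1, hB2, hB3, hsal]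
    cases code.toList.any (fun ch => PySem.Chars.islower ch) <;>
      cases code.toList.all PySem.Chars.isalnum <;>
      cases decide ((code.toList.filter (fun ch => PySem.Chars.isdigit ch)).length < 2) <;> rfl
  · simp only [hlen]
    have h1 : (((code.toList.length : Int) < 10 || (code.toList.length : Int) > 10) : Bool) = true := by
      simp only [decide_eq_true_eq, Bool.or_eq_true]
      omega
    have h2 : ((code.toList.length : Int) ≠ 10) := by exact_mod_cast h10
    rw [if_pos h1, if_pos h2]
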